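-- pv_equiv track=rewrite | github.com/shashiazad/ai-pr-reviewer | scripts/comment_manager.py | prioritize_and_budget
-- ===== SOURCE A (Python) =====
-- from typing import Any, Dict, List, Optional
--
-- SEVERITY_ORDER = {"error": 0, "warn": 1, "info": 2}
--
-- def prioritize_and_budget(
--     issues: List[Dict[str, Any]],
--     max_comments: int = 20,
--     severity_threshold: str = "info",
-- ) -> List[Dict[str, Any]]:
--     """Sort issues by severity, apply threshold filter, and enforce budget."""
--     threshold_rank = SEVERITY_ORDER.get(severity_threshold, 2)
--
--     # Filter by threshold
--     filtered = [
--         i for i in issues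
--         if SEVERITY_ORDER.get(i.get("severity", "info"), 2) <= threshold_rank
--     ]
--
--     # Sort: error first, then warn, then info
--     filtered.sort(key=lambda i: SEVERITY_ORDER.get(i.get("severity", "info"), 2))
--
--     # Budget
--     return filtered[:max_comments]
-- ===== SOURCE B (Python) =====
-- SEVERITY_ORDER = {"error": 0, "warn": 1, "info": 2}
--
--
-- def prioritize_and_budget(
--     issues,
--     max_comments=20,
--     severity_threshold="info",
-- ):
--     """Single-pass 3-way bucket distribution instead of filter + comparison sort."""
--     threshold_rank = SEVERITY_ORDER.get(severity_threshold, 2)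
--     buckets = ([], [], [])
--     for issue in issues:
--         rank = SEVERITY_ORDER.get(issue.get("severity", "info"), 2)
--         if rank <= threshold_rank:
--             buckets[rank].append(issue)
--     return (buckets[0] + buckets[1] + buckets[2])[:max_comments]
-- ===== Notes on version B (the rewrite author's own statement) =====
-- stated objective: alternative
-- what changed: Replaces filter-then-stable-comparison-sort with a single pass that distributes each admitted issue into one of three fixed severity buckets (error/warn/info) and concatenates them before slicing to the budget.
import Mathlib
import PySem

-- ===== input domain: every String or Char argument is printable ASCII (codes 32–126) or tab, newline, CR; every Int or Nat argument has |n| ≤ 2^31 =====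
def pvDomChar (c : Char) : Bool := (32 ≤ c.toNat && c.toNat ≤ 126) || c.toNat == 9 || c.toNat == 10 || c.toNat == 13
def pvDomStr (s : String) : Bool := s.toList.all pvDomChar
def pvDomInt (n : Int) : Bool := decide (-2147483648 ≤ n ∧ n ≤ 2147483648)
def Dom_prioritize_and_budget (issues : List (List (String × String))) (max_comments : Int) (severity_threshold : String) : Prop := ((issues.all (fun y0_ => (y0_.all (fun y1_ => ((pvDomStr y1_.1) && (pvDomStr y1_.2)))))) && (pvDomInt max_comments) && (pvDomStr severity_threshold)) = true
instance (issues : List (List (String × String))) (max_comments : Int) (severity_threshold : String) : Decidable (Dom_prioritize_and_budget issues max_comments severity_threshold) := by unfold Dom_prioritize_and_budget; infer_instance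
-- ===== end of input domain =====

-- B replaces A's filter + stable comparison sort with one pass over three severity buckets; objective: alternative (same result, different algorithm).

-- ===== PORT A =====
-- SEVERITY_ORDER = {"error": 0, "warn": 1, "info": 2}
def pvSevOrder : PySem.Dict String Int := PySem.Dict.mk [("error", 0), ("warn", 1), ("info", 2)]

-- SEVERITY_ORDER.get(i.get("severity", "info"), 2)  (shared helper, used verbatim by both Pythons)
def pvRank (i : List (String × String)) : Int :=
  PySem.Dict.getD pvSevOrder (PySem.Dict.getD (PySem.Dict.mk i) "severity" "info") 2

def prioritize_and_budget (issues : List (List (String × String))) (max_comments : Int) (severity_threshold : String) : List (List (String × String)) :=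
  let threshold_rank := PySem.Dict.getD pvSevOrder severity_threshold 2
  let filtered := issues.filter (fun i => decide (pvRank i ≤ threshold_rank))
  let sortedL := PySem.List.sorted filtered pvRank
  PySem.List.slice sortedL none (some max_comments)

-- ===== PORT B =====
-- buckets[rank].append(issue): the tuple indexing is ported as a branch on rank (exact: rank ∈ {0,1,2})
def prioritize_and_budget_alt (issues : List (List (String × String))) (max_comments : Int) (severity_threshold : String) : List (List (String × String)) :=
  let threshold_rank := PySem.Dict.getD pvSevOrder severity_threshold 2
  let buckets := issues.foldl
    (fun (st : List (List (String × String)) × List (List (String × String)) × List (List (String × String))) issue =>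
      let rank := pvRank issue
      if rank ≤ threshold_rank then
        if rank = 0 then (st.1 ++ [issue], st.2.1, st.2.2)
        else if rank = 1 then (st.1, st.2.1 ++ [issue], st.2.2)
        else (st.1, st.2.1, st.2.2 ++ [issue])
      else st)
    ([], [], [])
  PySem.List.slice (buckets.1 ++ buckets.2.1 ++ buckets.2.2) none (some max_comments)

-- ===== PRECONDITION & SPEC =====
def Spec_prioritize_and_budget (issues : List (List (String × String))) (max_comments : Int) (severity_threshold : String) (out : List (List (String × String))) : Prop := out = prioritize_and_budget_alt issues max_comments severity_threshold
instance (issues : List (List (String × String))) (max_comments : Int) (severity_threshold : String) (out : List (List (String × String))) : Decidable (Spec_prioritize_and_budget issues max_comments severity_threshold out) := by unfold Spec_prioritize_and_budget; infer_instance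

-- ===== CLAIM (what is proved, stated in full; the proofs are below) =====
def Claim_equal_prioritize_and_budget : Prop := ∀ (issues : List (List (String × String))) (max_comments : Int) (severity_threshold : String), Dom_prioritize_and_budget issues max_comments severity_threshold → Spec_prioritize_and_budget issues max_comments severity_threshold (prioritize_and_budget issues max_comments severity_threshold)

-- ===== LEMMAS AND PROOFS =====

theorem pvRank_cases (i : List (String × String)) : pvRank i = 0 ∨ pvRank i = 1 ∨ pvRank i = 2 := by
  unfold pvRank
  generalize PySem.Dict.getD (PySem.Dict.mk i) "severity" "info" = s
  by_cases h0 : s = "error"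
  · simp [pvSevOrder, PySem.Dict.getD, PySem.Dict.get?, h0]
  · by_cases h1 : s = "warn"
    · simp [pvSevOrder, PySem.Dict.getD, PySem.Dict.get?, h1]
    · simp [pvSevOrder, PySem.Dict.getD, PySem.Dict.get?, Ne.symm h0, Ne.symm h1]
      split_ifs <;> simp

theorem insertBy_of_forall_before {α : Type} (before : α → α → Bool) (x : α) (zs : List α)
    (h : ∀ z ∈ zs, before x z = true) : PySem.List.insertBy before x zs = x :: zs := by
  cases zs with
  | nil => rfl
  | cons z zs' => simp [PySem.List.insertBy, h z (by simp)]

theorem insertBy_append_left {α : Type} (before : α → α → Bool) (x : α) (ys zs : List α)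
    (h : ∀ y ∈ ys, before x y = false) :
    PySem.List.insertBy before x (ys ++ zs) = ys ++ PySem.List.insertBy before x zs := by
  induction ys with
  | nil => rfl
  | cons y ys ih =>
    simp [PySem.List.insertBy, h y (by simp)]
    exact ih (fun y hy => h y (by simp [hy]))

-- A's stable insertion sort over the rank key equals the 3-way bucket concatenation.
theorem foldl_insertBy_buckets (xs : List (List (String × String)))
    (A0 A1 A2 : List (List (String × String)))
    (h0 : ∀ a ∈ A0, pvRank a = 0) (h1 : ∀ a ∈ A1, pvRank a = 1) (h2 : ∀ a ∈ A2, pvRank a = 2) :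
    xs.foldl (fun acc x => PySem.List.insertBy (fun a b => decide (pvRank a < pvRank b)) x acc)
        (A0 ++ A1 ++ A2) =
      (A0 ++ xs.filter (fun i => decide (pvRank i = 0))) ++
      (A1 ++ xs.filter (fun i => decide (pvRank i = 1))) ++
      (A2 ++ xs.filter (fun i => decide (pvRank i = 2))) := by
  induction xs generalizing A0 A1 A2 with
  | nil => simp
  | cons x xs ih =>
    simp only [List.foldl_cons]
    rcases pvRank_cases x with hx | hx | hx
    · have step : PySem.List.insertBy (fun a b => decide (pvRank a < pvRank b)) x (A0 ++ A1 ++ A2)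
          = (A0 ++ [x]) ++ A1 ++ A2 := by
        rw [List.append_assoc,
          insertBy_append_left _ _ A0 (A1 ++ A2) (by intro y hy; simp [hx, h0 y hy]),
          insertBy_of_forall_before _ _ (A1 ++ A2) (by
            intro z hz; rcases List.mem_append.mp hz with hz | hz
            · simp [hx, h1 z hz]
            · simp [hx, h2 z hz])]
        simp
      rw [step, ih (A0 ++ [x]) A1 A2
        (by intro a ha; rcases List.mem_append.mp ha with ha | ha
            · exact h0 a ha
            · simp_all) h1 h2]
      simp [hx]
    · have step : PySem.List.insertBy (fun a b => decide (pvRank a < pvRank b)) x (A0 ++ A1 ++ A2)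
          = A0 ++ (A1 ++ [x]) ++ A2 := by
        rw [List.append_assoc,
          insertBy_append_left _ _ A0 (A1 ++ A2) (by intro y hy; simp [hx, h0 y hy]),
          insertBy_append_left _ _ A1 A2 (by intro y hy; simp [hx, h1 y hy]),
          insertBy_of_forall_before _ _ A2 (by intro z hz; simp [hx, h2 z hz])]
        simp
      rw [step, ih A0 (A1 ++ [x]) A2 h0
        (by intro a ha; rcases List.mem_append.mp ha with ha | ha
            · exact h1 a ha
            · simp_all) h2]
      simp [hx]
    · have step : PySem.List.insertBy (fun a b => decide (pvRank a < pvRank b)) x (A0 ++ A1 ++ A2)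
          = A0 ++ A1 ++ (A2 ++ [x]) := by
        rw [PySem.List.insertBy_of_forall_not_before _ _ _ (by
          intro y hy
          rcases List.mem_append.mp hy with hy' | hy'
          · rcases List.mem_append.mp hy' with hy'' | hy''
            · simp [hx, h0 y hy'']
            · simp [hx, h1 y hy'']
          · simp [hx, h2 y hy'])]
        simp
      rw [step, ih A0 A1 (A2 ++ [x]) h0 h1
        (by intro a ha; rcases List.mem_append.mp ha with ha | ha
            · exact h2 a ha
            · simp_all)]
      simp [hx]

-- B's fold over the three buckets equals three filters of the admitted issues.
theorem foldl_buckets_filters (tr : Int) (xs : List (List (String × String)))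
    (e w i : List (List (String × String))) :
    xs.foldl
      (fun (st : List (List (String × String)) × List (List (String × String)) × List (List (String × String))) issue =>
        let rank := pvRank issue
        if rank ≤ tr then
          if rank = 0 then (st.1 ++ [issue], st.2.1, st.2.2)
          else if rank = 1 then (st.1, st.2.1 ++ [issue], st.2.2)
          else (st.1, st.2.1, st.2.2 ++ [issue])
        else st) (e, w, i) =
      (e ++ xs.filter (fun x => decide (pvRank x ≤ tr) && decide (pvRank x = 0)),
       w ++ xs.filter (fun x => decide (pvRank x ≤ tr) && decide (pvRank x = 1)),
       i ++ xs.filter (fun x => decide (pvRank x ≤ tr) && ¬(decide (pvRank x = 0) || decide (pvRank x = 1)))) := by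
  induction xs generalizing e w i with
  | nil => simp
  | cons x xs ih =>
    simp only [List.foldl_cons, List.filter_cons]
    by_cases hle : pvRank x ≤ tr
    · rcases pvRank_cases x with h | h | h
      · have h' : (0:Int) ≤ tr := h ▸ hle
        simp [h, h', ih]
      · have h' : (1:Int) ≤ tr := h ▸ hle
        simp [h, h', ih]
      · have h' : (2:Int) ≤ tr := h ▸ hle
        simp [h, h', ih]
    · simp [hle, ih]

theorem filter2_eq (tr : Int) (xs : List (List (String × String))) :
    xs.filter (fun x => decide (pvRank x ≤ tr) && ¬(decide (pvRank x = 0) || decide (pvRank x = 1))) =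
      xs.filter (fun x => decide (pvRank x ≤ tr) && decide (pvRank x = 2)) := by
  apply List.filter_congr
  intro x _
  rcases pvRank_cases x with hx | hx | hx <;> simp [hx]

-- ===== VERDICT (by name: the statement is the Claim_ definition above) =====
theorem prioritize_and_budget_spec : Claim_equal_prioritize_and_budget := by
  intro issues max_comments severity_threshold _
  unfold Spec_prioritize_and_budget prioritize_and_budget prioritize_and_budget_alt
  simp only []
  rw [foldl_buckets_filters, filter2_eq]
  congr 1
  rw [PySem.List.sorted_eq_foldl_insertBy]
  have := foldl_insertBy_buckets
    (issues.filter (fun i => decide (pvRank i ≤ PySem.Dict.getD pvSevOrder severity_threshold 2)))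
    [] [] [] (by simp) (by simp) (by simp)
  simp only [List.nil_append] at this
  rw [this]
  simp [List.filter_filter, Bool.and_comm]
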